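-- pv_equiv track=rewrite | github.com/stmharry/body-composition | thin/estimator.py | _example_to_features_and_labels
-- ===== SOURCE A (Python) =====
-- def _example_to_features_and_labels(example, label_keys):
--     features = example.copy()
--     labels = {}
--     for key in label_keys:
--         value = features.pop(key, None)
--         if value is not None:
--             labels[key] = value
--
--     return (features, labels)
-- ===== SOURCE B (Python) =====
-- def _example_to_features_and_labels(example, label_keys):
--     label_keys = list(label_keys)
--     label_set = set(label_keys)
--     features = {k: v for k, v in example.items() if k not in label_set}
--     labels = {k: example[k] for k in label_keys if k in example}
--     return (features, labels)
-- ===== Notes on version B (the rewrite author's own statement) =====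
-- stated objective: simpler
-- what changed: B builds both dicts directly by filtering (features as a comprehension over example.items() against a label-key set, labels as a comprehension over label_keys of present keys) instead of A's copy-then-pop mutation of a working dict.
import Mathlib
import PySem

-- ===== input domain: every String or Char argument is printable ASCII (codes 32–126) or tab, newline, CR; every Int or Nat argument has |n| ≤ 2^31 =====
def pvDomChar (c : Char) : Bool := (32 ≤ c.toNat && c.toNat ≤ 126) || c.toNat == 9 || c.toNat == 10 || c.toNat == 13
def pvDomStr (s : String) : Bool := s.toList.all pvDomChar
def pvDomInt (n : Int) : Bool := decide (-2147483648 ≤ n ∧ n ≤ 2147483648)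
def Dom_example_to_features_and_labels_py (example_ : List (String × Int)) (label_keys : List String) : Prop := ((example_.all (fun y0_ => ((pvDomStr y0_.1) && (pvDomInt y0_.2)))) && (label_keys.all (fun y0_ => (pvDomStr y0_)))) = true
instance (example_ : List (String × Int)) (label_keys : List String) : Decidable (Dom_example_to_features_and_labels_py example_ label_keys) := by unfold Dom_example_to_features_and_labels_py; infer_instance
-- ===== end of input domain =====

-- B replaces A's copy-then-pop dict mutation by building features and labels directly with filters; equivalence is exact.


-- ===== PORT A =====
-- features = example.copy(); labels = {}; for key in label_keys: value = features.pop(key, None); if value is not None: labels[key] = value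
-- (values are ints, so 'value is not None' is exactly 'key was present', i.e. pop? succeeded)
def example_to_features_and_labels_py (example_ : List (String × Int)) (label_keys : List String) : (List (String × Int)) × (List (String × Int)) :=
  let res := label_keys.foldl
    (fun (fl : PySem.Dict String Int × PySem.Dict String Int) key =>
      match fl.1.pop? key with
      | some (v, f') => (f', fl.2.insert key v)
      | none => fl)
    (PySem.Dict.mk example_, PySem.Dict.empty)
  (res.1.items, res.2.items)

-- ===== PORT B =====
-- label_set = set(label_keys); features = {k: v for k, v in example.items() if k not in label_set};
-- labels = {k: example[k] for k in label_keys if k in example}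
def example_to_features_and_labels_py_alt (example_ : List (String × Int)) (label_keys : List String) : (List (String × Int)) × (List (String × Int)) :=
  let labelSet : PySem.Set String := PySem.Set.ofList label_keys
  let features : List (String × Int) := example_.filter (fun p => !(PySem.Set.contains labelSet p.1))
  let labels : PySem.Dict String Int :=
    label_keys.foldl
      (fun (d : PySem.Dict String Int) k =>
        match (PySem.Dict.mk example_).get? k with
        | some v => d.insert k v
        | none => d)
      PySem.Dict.empty
  (features, labels.items)

-- ===== PRECONDITION & SPEC =====
def Spec_example_to_features_and_labels_py (example_ : List (String × Int)) (label_keys : List String) (out : (List (String × Int)) × (List (String × Int))) : Prop := out = example_to_features_and_labels_py_alt example_ label_keys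
instance (example_ : List (String × Int)) (label_keys : List String) (out : (List (String × Int)) × (List (String × Int))) : Decidable (Spec_example_to_features_and_labels_py example_ label_keys out) := by unfold Spec_example_to_features_and_labels_py; infer_instance

-- ===== CLAIM (what is proved, stated in full; the proofs are below) =====
def Claim_equal_example_to_features_and_labels_py : Prop := ∀ (example_ : List (String × Int)) (label_keys : List String), Dom_example_to_features_and_labels_py example_ label_keys → Spec_example_to_features_and_labels_py example_ label_keys (example_to_features_and_labels_py example_ label_keys)

-- ===== LEMMAS AND PROOFS =====

-- replacing-by-(k,v) map is the identity on a list without key k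
theorem map_keep (l : List (String × Int)) (k : String) (v : Int)
    (h : ∀ p ∈ l, p.1 ≠ k) :
    l.map (fun p => if p.1 == k then (k, v) else p) = l := by
  induction l with
  | nil => rfl
  | cons p rest ih =>
    have hp := h p (List.mem_cons_self)
    rw [List.map_cons, ih (fun q hq => h q (List.mem_cons_of_mem _ hq))]
    simp [beq_iff_eq, hp]

-- inserting a key with the value it already has is the identity (unique keys)
theorem insert_get_self (d : PySem.Dict String Int) (k : String) (v : Int)
    (h : d.get? k = some v) (hn : d.keys.Nodup) : d.insert k v = d := by
  have hc : d.contains k = true := by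
    rw [PySem.Dict.contains_eq_isSome_get?, h]; rfl
  apply PySem.Dict.ext
  rw [PySem.Dict.items_insert_of_contains _ _ hc]
  clear hc
  obtain ⟨items⟩ := d
  induction items with
  | nil => rfl
  | cons p rest ih =>
    obtain ⟨a, b⟩ := p
    by_cases hak : a = k
    · subst hak
      rw [PySem.Dict.get?_mk_cons] at h
      simp only [BEq.rfl, if_pos] at h
      have hb : b = v := by injection h
      subst hb
      simp only [PySem.Dict.keys, List.map_cons, List.nodup_cons] at hn
      simp only [List.map_cons, BEq.rfl, if_pos]
      rw [map_keep rest a b (fun q hq hq1 => hn.1 (hq1 ▸ List.mem_map_of_mem hq))]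
    · have hne : (a == k) = false := by simp [hak]
      rw [PySem.Dict.get?_mk_cons] at h
      rw [hne] at h
      simp only [Bool.false_eq_true, if_neg, not_false_iff] at h
      simp only [PySem.Dict.keys, List.map_cons, List.nodup_cons] at hn
      simp only [List.map_cons, hne, Bool.false_eq_true, if_neg, not_false_iff]
      rw [ih h hn.2]
  -- (hc is re-derived for rest inside ih via hcrest)

-- erase at k' ≠ k looks through; erase at k yields none
theorem get?_erase (d : PySem.Dict String Int) (k k' : String) :
    (d.erase k).get? k' = if k' = k then none else d.get? k' := by
  obtain ⟨items⟩ := d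
  induction items with
  | nil => simp [PySem.Dict.erase, PySem.Dict.get?]
  | cons p rest ih =>
    obtain ⟨a, b⟩ := p
    by_cases hak : a = k
    · subst hak
      have : (PySem.Dict.mk ((a, b) :: rest)).erase a = (PySem.Dict.mk rest).erase a := by
        simp [PySem.Dict.erase]
      rw [this, ih]
      by_cases h' : k' = a
      · simp [h']
      · simp [h', PySem.Dict.get?_mk_cons, (by simp [Ne.symm h'] : (a == k') = false)]
    · have hstep : (PySem.Dict.mk ((a, b) :: rest)).erase k
          = PySem.Dict.mk ((a, b) :: ((PySem.Dict.mk rest).erase k).items) := by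
        simp [PySem.Dict.erase, hak]
      rw [hstep, PySem.Dict.get?_mk_cons]
      by_cases hak' : a = k'
      · subst hak'
        simp [hak, PySem.Dict.get?_mk_cons]
      · simp only [(by simp [hak'] : (a == k') = false), Bool.false_eq_true, if_neg,
          not_false_iff]
        rw [show (PySem.Dict.mk ((PySem.Dict.mk rest).erase k).items) = (PySem.Dict.mk rest).erase k from rfl, ih]
        by_cases h' : k' = k
        · simp [h']
        · simp [h', PySem.Dict.get?_mk_cons, (by simp [hak'] : (a == k') = false)]

-- A's loop equals (iterated erase, B's labels loop) under the invariant
theorem loop_eq (xs : List (String × Int)) (ks : List String)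
    (f l : PySem.Dict String Int)
    (hsub : ∀ k v, f.get? k = some v → (PySem.Dict.mk xs).get? k = some v)
    (hdone : ∀ k v, f.get? k = none → (PySem.Dict.mk xs).get? k = some v → l.insert k v = l)
    (hn : l.keys.Nodup) :
    ks.foldl
      (fun (fl : PySem.Dict String Int × PySem.Dict String Int) key =>
        match fl.1.pop? key with
        | some (v, f') => (f', fl.2.insert key v)
        | none => fl) (f, l)
    = (ks.foldl (fun d k => d.erase k) f,
       ks.foldl
        (fun (d : PySem.Dict String Int) k =>
          match (PySem.Dict.mk xs).get? k with
          | some v => d.insert k v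
          | none => d) l) := by
  induction ks generalizing f l with
  | nil => rfl
  | cons key ks ih =>
    simp only [List.foldl_cons]
    cases hf : f.get? key with
    | some v =>
      have hx : (PySem.Dict.mk xs).get? key = some v := hsub _ _ hf
      simp only [PySem.Dict.pop?, hf, Option.map_some, hx]
      apply ih (f.erase key) (l.insert key v)
      · intro k w hkw
        rw [get?_erase] at hkw
        by_cases h' : k = key
        · simp [h'] at hkw
        · rw [if_neg h'] at hkw
          exact hsub _ _ hkw
      · intro k w hkn hkx
        rw [get?_erase] at hkn
        by_cases h' : k = key
        · subst h'
          have : w = v := by rw [hx] at hkx; injection hkx with h''; exact h''.symm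
          subst this
          exact PySem.Dict.insert_insert_self _ _ _ _
        · rw [if_neg h'] at hkn
          have hl : l.insert k w = l := hdone _ _ hkn hkx
          have hlk : l.get? k = some w := by
            conv_lhs => rw [← hl]
            exact PySem.Dict.get?_insert_self _ _ _
          have : (l.insert key v).get? k = some w := by
            rw [PySem.Dict.get?_insert_of_ne _ _ h', hlk]
          exact insert_get_self _ _ _ this (PySem.Dict.nodup_keys_insert _ _ _ hn)
      · exact PySem.Dict.nodup_keys_insert _ _ _ hn
    | none =>
      have hfe : f.erase key = f := by
        apply PySem.Dict.ext
        simp only [PySem.Dict.erase]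
        apply List.filter_eq_self.mpr
        intro p hp
        simp only [Bool.not_eq_eq_eq_not, Bool.not_true, beq_eq_false_iff_ne]
        intro hpk
        have : (List.find? (fun q => q.1 == key) f.items).isSome := by
          apply List.find?_isSome.mpr
          exact ⟨p, hp, by simp [hpk]⟩
        simp only [PySem.Dict.get?] at hf
        rw [Option.map_eq_none_iff] at hf
        rw [hf] at this
        simp at this
      cases hx : (PySem.Dict.mk xs).get? key with
      | none =>
        simp only [PySem.Dict.pop?, hf, Option.map_none]
        rw [hfe]
        exact ih f l hsub hdone hn
      | some v =>
        simp only [PySem.Dict.pop?, hf, Option.map_none]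
        rw [hfe, hdone _ _ hf hx]
        exact ih f l hsub hdone hn

-- iterated erase is one filter against the key set
theorem erase_fold_items (ks : List String) (d : PySem.Dict String Int) :
    (ks.foldl (fun d k => d.erase k) d).items
      = d.items.filter (fun p => !(PySem.Set.contains (PySem.Set.ofList ks) p.1)) := by
  induction ks generalizing d with
  | nil =>
    simp [PySem.Set.contains_eq_listContains]
  | cons k ks ih =>
    simp only [List.foldl_cons]
    rw [ih]
    simp only [PySem.Dict.erase, List.filter_filter]
    apply List.filter_congr
    intro p _
    simp only [PySem.Set.contains_eq_listContains, List.contains_eq_mem, PySem.Set.mem_ofList,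
      List.mem_cons]
    by_cases h1 : p.1 = k <;> by_cases h2 : p.1 ∈ ks <;> simp [h1, h2]

-- ===== VERDICT (by name: the statement is the Claim_ definition above) =====
theorem example_to_features_and_labels_py_spec : Claim_equal_example_to_features_and_labels_py := by
  intro example_ label_keys _
  unfold Spec_example_to_features_and_labels_py
  unfold example_to_features_and_labels_py example_to_features_and_labels_py_alt
  rw [loop_eq example_ label_keys (PySem.Dict.mk example_) PySem.Dict.empty
      (fun k v h => h)
      (fun k v h1 h2 => by rw [h1] at h2; exact absurd h2 (by simp))
      PySem.Dict.nodup_keys_empty]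
  simp [erase_fold_items]
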